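-- pv_equiv track=rewrite | github.com/raeez/chiral-bar-cobar | compute/lib/w3_bar_extended.py | bar_chain_dim
-- ===== SOURCE A (Python) =====
-- from math import factorial
-- from typing import Dict, List, Optional, Tuple
--
-- def dim_vbar_gf(max_h: int) -> Dict[int, int]:
--     """Compute dim V-bar_h for h=0,...,max_h using the generating function.
--
--     GF = prod_{n>=2} 1/(1-q^n) * prod_{n>=3} 1/(1-q^n) - 1
--     """
--     c_L = [0] * (max_h + 1)
--     c_L[0] = 1
--     for n in range(2, max_h + 1):
--         for k in range(n, max_h + 1):
--             c_L[k] += c_L[k - n]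
--
--     c_W = [0] * (max_h + 1)
--     c_W[0] = 1
--     for n in range(3, max_h + 1):
--         for k in range(n, max_h + 1):
--             c_W[k] += c_W[k - n]
--
--     product = [0] * (max_h + 1)
--     for i in range(max_h + 1):
--         for j in range(max_h + 1 - i):
--             product[i + j] += c_L[i] * c_W[j]
--     product[0] -= 1  # subtract vacuum
--
--     return {h: product[h] for h in range(max_h + 1)}
--
-- def bar_chain_dim(n: int, h: int, vbar_dims: Optional[Dict[int, int]] = None,
--                   max_h: int = 30) -> int:
--     """Dimension of the bar chain group B^n_h (at bar degree n and total weight h).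
--
--     B^n = V-bar^{tensor(n+1)} x OS^n(Conf_{n+1}(C))
--     dim B^n_h = (number of ordered (n+1)-tuples at weight h) * n!
--
--     The factor n! = dim OS^n(Conf_{n+1}(C)) is the top OS algebra dimension.
--     """
--     if vbar_dims is None:
--         vbar_dims = dim_vbar_gf(max_h)
--
--     # Count ordered (n+1)-tuples of V-bar states with total weight h
--     # Each state has weight >= 2, so h >= 2*(n+1)
--     if h < 2 * (n + 1):
--         return 0
--
--     # Compute by convolution
--     # f^{n+1}(h) = sum_{h1+...+h_{n+1}=h} prod dim(V-bar_{hi})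
--     prev = {0: 1}  # Start with the "empty" product
--     for _ in range(n + 1):
--         curr: Dict[int, int] = {}
--         for hp, cp in prev.items():
--             for hw in range(2, h - hp + 1):
--                 dw = vbar_dims.get(hw, 0)
--                 if dw == 0:
--                     continue
--                 ht = hp + hw
--                 if ht > h:
--                     break
--                 curr[ht] = curr.get(ht, 0) + cp * dw
--         prev = curr
--
--     tuple_count = prev.get(h, 0)
--     os_dim = factorial(n)  # dim OS^n(Conf_{n+1})
--     return tuple_count * os_dim
-- ===== SOURCE B (Python) =====
-- from math import factorial
--
-- def _vbar_table(max_h):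
--     """Coefficients (up to degree max_h) of
--     prod_{m>=2} 1/(1-q^m) * prod_{m>=3} 1/(1-q^m) - 1,
--     computed by dividing one array in place by each factor (1 - q^m)."""
--     p = [0] * (max_h + 1)
--     p[0] = 1
--     for m in range(2, max_h + 1):
--         for k in range(m, max_h + 1):
--             p[k] += p[k - m]
--     for m in range(3, max_h + 1):
--         for k in range(m, max_h + 1):
--             p[k] += p[k - m]
--     p[0] -= 1
--     return p
--
-- def bar_chain_dim(n, h, vbar_dims=None, max_h=30):
--     if h < 2 * (n + 1):
--         return 0
--     if vbar_dims is None: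
--         table = _vbar_table(max_h)
--         f = [table[w] if 2 <= w <= max_h else 0 for w in range(h + 1)]
--     else:
--         f = [vbar_dims.get(w, 0) if w >= 2 else 0 for w in range(h + 1)]
--
--     def mul(a, b):
--         r = [0] * (h + 1)
--         for i, ai in enumerate(a):
--             if ai:
--                 for j in range(h + 1 - i):
--                     r[i + j] += ai * b[j]
--         return r
--
--     # (n+1)-st power of f modulo q^{h+1}, by binary exponentiation
--     result = [1] + [0] * h
--     base, e = f, n + 1
--     while e > 0:
--         if e & 1:
--             result = mul(result, base)
--         e >>= 1
--         if e:
--             base = mul(base, base)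
--     return result[h] * factorial(n)
-- ===== Notes on version B (the rewrite author's own statement) =====
-- stated objective: alternative
-- what changed: B replaces A's (n+1)-step dict-based repeated convolution with binary exponentiation (square-and-multiply) of the truncated coefficient polynomial mod q^(h+1), and builds the V-bar generating-function table by dividing a single array in place by each factor (1-q^m) instead of building two arrays and convolving them.
import Mathlib
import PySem

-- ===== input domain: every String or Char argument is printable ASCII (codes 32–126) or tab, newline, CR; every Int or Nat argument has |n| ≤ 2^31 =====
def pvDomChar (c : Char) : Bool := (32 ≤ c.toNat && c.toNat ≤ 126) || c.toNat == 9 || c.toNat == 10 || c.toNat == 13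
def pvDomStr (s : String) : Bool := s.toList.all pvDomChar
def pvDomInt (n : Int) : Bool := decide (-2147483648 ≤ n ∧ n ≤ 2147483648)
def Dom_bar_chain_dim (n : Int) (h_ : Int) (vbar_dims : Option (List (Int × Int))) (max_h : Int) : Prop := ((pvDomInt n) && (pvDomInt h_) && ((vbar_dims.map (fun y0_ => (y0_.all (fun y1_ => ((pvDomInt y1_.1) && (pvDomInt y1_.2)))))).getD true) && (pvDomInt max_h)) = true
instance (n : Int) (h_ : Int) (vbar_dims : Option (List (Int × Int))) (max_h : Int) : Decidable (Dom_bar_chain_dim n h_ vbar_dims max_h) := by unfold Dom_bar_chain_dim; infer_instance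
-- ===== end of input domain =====

-- ===== PORT A =====
-- B replaces A's (n+1)-fold dict-based self-convolution by binary exponentiation of the
-- truncated coefficient polynomial (objective: alternative algorithm, similar measured cost),
-- and builds the V-bar table by dividing one array in place instead of convolving two.

-- math.factorial(n); raises ValueError for n < 0 (those inputs are excluded by Pre_)
def pyFactorial (n : Int) : Int := (Nat.factorial n.toNat : Int)

-- the in-place loop `for k in range(m, max_h+1): c[k] += c[k-m]` (shared loop shape)
def divStep (max_h : Int) (m : Int) (c : List Int) : List Int :=
  (PySem.List.pyRange m (max_h + 1) 1).foldl (fun c k =>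
    PySem.List.pySetD c k (PySem.List.pyGetD c k 0 + PySem.List.pyGetD c (k - m) 0)) c

-- literal port of dim_vbar_gf; `[0]*(max_h+1)` = replicate (max_h+1).toNat 0, and the
-- assignment c_L[0] = 1 raises IndexError when max_h < 0 (excluded by Pre_);
-- all other list accesses are in range, where pyGetD/pySetD are exact
def dim_vbar_gf (max_h : Int) : PySem.Dict Int Int :=
  let cL : List Int := List.replicate (max_h + 1).toNat 0
  let cL := PySem.List.pySetD cL 0 1
  let cL := (PySem.List.pyRange 2 (max_h + 1) 1).foldl (fun cL n => divStep max_h n cL) cL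
  let cW : List Int := List.replicate (max_h + 1).toNat 0
  let cW := PySem.List.pySetD cW 0 1
  let cW := (PySem.List.pyRange 3 (max_h + 1) 1).foldl (fun cW n => divStep max_h n cW) cW
  let product : List Int := List.replicate (max_h + 1).toNat 0
  let product := (PySem.List.pyRange 0 (max_h + 1) 1).foldl (fun product i =>
    (PySem.List.pyRange 0 (max_h + 1 - i) 1).foldl (fun product j =>
      PySem.List.pySetD product (i + j)
        (PySem.List.pyGetD product (i + j) 0 +
          PySem.List.pyGetD cL i 0 * PySem.List.pyGetD cW j 0)) product) product
  let product := PySem.List.pySetD product 0 (PySem.List.pyGetD product 0 0 - 1)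
  (PySem.List.pyRange 0 (max_h + 1) 1).foldl
    (fun d h => d.insert h (PySem.List.pyGetD product h 0)) PySem.Dict.empty

-- the inner `for hw in range(2, h-hp+1)` loop of A, with its `continue` and `break`
def barInner (vd : PySem.Dict Int Int) (h_ hp cp : Int) (curr : PySem.Dict Int Int) :
    List Int → PySem.Dict Int Int
  | [] => curr
  | hw :: rest =>
    let dw := vd.getD hw 0
    if dw = 0 then barInner vd h_ hp cp curr rest
    else
      let ht := hp + hw
      if h_ < ht then curr   -- `if ht > h: break`
      else barInner vd h_ hp cp (curr.insert ht (curr.getD ht 0 + cp * dw)) rest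

def bar_chain_dim (n : Int) (h_ : Int) (vbar_dims : Option (List (Int × Int))) (max_h : Int) : Int :=
  let vd : PySem.Dict Int Int := match vbar_dims with
    | none => dim_vbar_gf max_h
    | some d => PySem.Dict.mk d
  if h_ < 2 * (n + 1) then 0
  else
    let prev : PySem.Dict Int Int := PySem.Dict.mk [(0, 1)]
    let prev := (PySem.List.pyRange 0 (n + 1) 1).foldl (fun prev _ =>
      prev.items.foldl (fun curr p =>
        barInner vd h_ p.1 p.2 curr (PySem.List.pyRange 2 (h_ - p.1 + 1) 1))
        PySem.Dict.empty) prev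
    prev.getD h_ 0 * pyFactorial n

-- ===== PORT B =====
-- literal port of _vbar_table from Source B (in-place division of one array; `p[0] = 1`
-- raises IndexError for max_h < 0, excluded by Pre_)
def vbar_table (max_h : Int) : List Int :=
  let p : List Int := List.replicate (max_h + 1).toNat 0
  let p := PySem.List.pySetD p 0 1
  let p := (PySem.List.pyRange 2 (max_h + 1) 1).foldl (fun p m => divStep max_h m p) p
  let p := (PySem.List.pyRange 3 (max_h + 1) 1).foldl (fun p m => divStep max_h m p) p
  PySem.List.pySetD p 0 (PySem.List.pyGetD p 0 0 - 1)

-- Source B's mul: truncated product accumulated in place, skipping zero coefficients of a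
def tmul (h_ : Int) (a b : List Int) : List Int :=
  (PySem.List.enumerate a).foldl (fun r p =>
    if p.2 ≠ 0 then
      (PySem.List.pyRange 0 (h_ + 1 - p.1) 1).foldl (fun r j =>
        PySem.List.pySetD r (p.1 + j)
          (PySem.List.pyGetD r (p.1 + j) 0 + p.2 * PySem.List.pyGetD b j 0)) r
    else r) (List.replicate (h_ + 1).toNat 0)

-- Source B's `while e > 0` binary-exponentiation loop
def powLoop (h_ : Int) (result base : List Int) (e : Int) : List Int :=
  if _h : 0 < e then
    let result := if PySem.Int.band e 1 ≠ 0 then tmul h_ result base else result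
    let e' := e >>> (1 : Nat)
    let base := if e' ≠ 0 then tmul h_ base base else base
    powLoop h_ result base e'
  else result
termination_by e.toNat
decreasing_by
  have he : e >>> (1 : Nat) = e / 2 ^ (1:Nat) := Int.shiftRight_eq_div_pow e 1
  simp only [pow_one] at he
  rw [he]
  omega

def bar_chain_dim_alt (n : Int) (h_ : Int) (vbar_dims : Option (List (Int × Int))) (max_h : Int) : Int :=
  if h_ < 2 * (n + 1) then 0
  else
    let f : List Int := match vbar_dims with
      | none =>
        let table := vbar_table max_h
        (PySem.List.pyRange 0 (h_ + 1) 1).map (fun w =>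
          if 2 ≤ w ∧ w ≤ max_h then PySem.List.pyGetD table w 0 else 0)
      | some d =>
        (PySem.List.pyRange 0 (h_ + 1) 1).map (fun w =>
          if 2 ≤ w then (PySem.Dict.mk d).getD w 0 else 0)
    let result : List Int := 1 :: List.replicate h_.toNat 0   -- [1] + [0]*h
    let result := powLoop h_ result f (n + 1)
    PySem.List.pyGetD result h_ 0 * pyFactorial n

-- ===== PRECONDITION & SPEC =====
-- Pre_ excludes exactly the inputs where A raises: vbar_dims = None with max_h < 0
-- (IndexError in dim_vbar_gf) and n < 0 reaching math.factorial (ValueError).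
def Pre_bar_chain_dim (n : Int) (h_ : Int) (vbar_dims : Option (List (Int × Int))) (max_h : Int) : Prop :=
  (vbar_dims = none → 0 ≤ max_h) ∧ (n < 0 → h_ < 2 * (n + 1))
instance (n : Int) (h_ : Int) (vbar_dims : Option (List (Int × Int))) (max_h : Int) : Decidable (Pre_bar_chain_dim n h_ vbar_dims max_h) := by unfold Pre_bar_chain_dim; infer_instance

def pvWitness_bar_chain_dim : Int × Int × (Option (List (Int × Int))) × Int := (1, 6, none, 8)

def Spec_bar_chain_dim (n : Int) (h_ : Int) (vbar_dims : Option (List (Int × Int))) (max_h : Int) (out : Int) : Prop := out = bar_chain_dim_alt n h_ vbar_dims max_h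
instance (n : Int) (h_ : Int) (vbar_dims : Option (List (Int × Int))) (max_h : Int) (out : Int) : Decidable (Spec_bar_chain_dim n h_ vbar_dims max_h out) := by unfold Spec_bar_chain_dim; infer_instance

-- ===== CLAIM (what is proved, stated in full; the proofs are below) =====
def Claim_equal_bar_chain_dim : Prop := ∀ (n : Int) (h_ : Int) (vbar_dims : Option (List (Int × Int))) (max_h : Int), Dom_bar_chain_dim n h_ vbar_dims max_h → Pre_bar_chain_dim n h_ vbar_dims max_h → Spec_bar_chain_dim n h_ vbar_dims max_h (bar_chain_dim n h_ vbar_dims max_h)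

-- ===== LEMMAS AND PROOFS =====


-- approximation relation: list l carries the first H+1 coefficients of a power series
def pvApprox (H : Nat) (l : List Int) (phi : PowerSeries ℤ) : Prop :=
  l.length = H + 1 ∧ ∀ k : Nat, k ≤ H → l.getD k 0 = PowerSeries.coeff k phi

lemma pvCoeff_mul_list (phi psi : PowerSeries ℤ) (k : Nat) :
    PowerSeries.coeff k (phi * psi) =
      ((List.range (k+1)).map
        (fun j => PowerSeries.coeff j phi * PowerSeries.coeff (k-j) psi)).sum := by
  rw [PowerSeries.coeff_mul, Finset.Nat.sum_antidiagonal_eq_sum_range_succ_mk,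
    ← List.toFinset_range, List.sum_toFinset _ List.nodup_range]

-- the weight-generating coefficients both programs convolve, as a power series
noncomputable def pvP (h_ : Int) (lookup : Int → Int) : PowerSeries ℤ :=
  PowerSeries.mk (fun w : Nat => if 2 ≤ (w:Int) ∧ (w:Int) ≤ h_ then lookup (w:Int) else 0)

def pvLookup (vbar_dims : Option (List (Int × Int))) (max_h : Int) : Int → Int :=
  match vbar_dims with
  | some d => fun w => (PySem.Dict.mk d).getD w 0
  | none => fun w => if w ≤ max_h then (vbar_table max_h).getD w.toNat 0 else 0

lemma pvGetD_map_range_int (g : Int → Int) (H k : Nat) (hk : k ≤ H) :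
    ((PySem.List.pyRange 0 ((H:Int)+1) 1).map g).getD k 0 = g (k:Int) := by
  have h1 : ((H:Int)+1) = ((H+1 : Nat) : Int) := by push_cast; ring
  rw [h1, PySem.List.pyRange_zero_nat, List.map_map,
    PySem.List.getD_map_range _ _ _ _ (by omega)]
  rfl

lemma pvGetD_one_replicate (H k : Nat) :
    (1 :: List.replicate H (0:Int)).getD k 0 = if k = 0 then 1 else 0 := by
  cases k with
  | zero => rfl
  | succ k =>
    simp only [List.getD, List.getElem?_cons_succ, List.getElem?_replicate]
    split_ifs <;> simp_all

lemma pvBarInner_getD (vd : PySem.Dict Int Int) (h_ hp cp : Int) :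
    ∀ (cnt : Nat) (lo : Int) (curr : PySem.Dict Int Int) (s : Int),
      (h_ - hp + 1 - lo).toNat = cnt → 2 ≤ lo →
      (barInner vd h_ hp cp curr (PySem.List.pyRange lo (h_ - hp + 1) 1)).getD s 0
        = curr.getD s 0 + (if hp + lo ≤ s ∧ s ≤ h_ then cp * vd.getD (s - hp) 0 else 0) := by
  intro cnt
  induction cnt with
  | zero =>
    intro lo curr s hcnt hlo
    rw [PySem.List.pyRange_one_eq_nil (by omega)]
    simp only [barInner]
    rw [if_neg (by omega)]
    ring
  | succ cnt ih =>
    intro lo curr s hcnt hlo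
    have hlt : lo < h_ - hp + 1 := by omega
    rw [PySem.List.pyRange_one_cons hlt]
    simp only [barInner]
    by_cases hdw : vd.getD lo 0 = 0
    · rw [if_pos hdw, ih (lo+1) curr s (by omega) (by omega)]
      by_cases hs : s = hp + lo
      · rw [if_neg (by omega), if_pos (by omega)]
        have h1 : s - hp = lo := by omega
        rw [h1, hdw, mul_zero]
      · rw [if_congr (show (hp + (lo+1) ≤ s ∧ s ≤ h_) ↔ (hp + lo ≤ s ∧ s ≤ h_) by omega) rfl rfl]
    · rw [if_neg hdw, if_neg (by omega : ¬ h_ < hp + lo),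
        ih (lo+1) _ s (by omega) (by omega), PySem.Dict.getD_insert]
      by_cases hs : s = hp + lo
      · rw [if_pos hs, if_neg (by omega), if_pos (by omega)]
        have h1 : s - hp = lo := by omega
        rw [h1, hs]
        ring
      · rw [if_neg hs,
          if_congr (show (hp + (lo+1) ≤ s ∧ s ≤ h_) ↔ (hp + lo ≤ s ∧ s ≤ h_) by omega) rfl rfl]

lemma pvBarInner_keys (vd : PySem.Dict Int Int) (h_ hp cp : Int) (hhp : 0 ≤ hp) :
    ∀ (ws : List Int) (curr : PySem.Dict Int Int), (∀ w ∈ ws, 0 ≤ w) →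
      (∀ k ∈ (barInner vd h_ hp cp curr ws).keys, k ∈ curr.keys ∨ (0 ≤ k ∧ k ≤ h_)) ∧
      (curr.keys.Nodup → (barInner vd h_ hp cp curr ws).keys.Nodup) := by
  intro ws
  induction ws with
  | nil =>
    intro curr hw
    simp only [barInner]
    exact ⟨fun k hk => Or.inl hk, fun h => h⟩
  | cons w rest ih =>
    intro curr hw
    have hw0 : 0 ≤ w := hw w (by simp)
    simp only [barInner]
    by_cases hdw : vd.getD w 0 = 0
    · rw [if_pos hdw]
      exact ih curr (fun x hx => hw x (List.mem_cons_of_mem _ hx))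
    · rw [if_neg hdw]
      by_cases hbr : h_ < hp + w
      · rw [if_pos hbr]
        exact ⟨fun k hk => Or.inl hk, fun h => h⟩
      · rw [if_neg hbr]
        have h2 := ih (curr.insert (hp + w) (curr.getD (hp + w) 0 + cp * vd.getD w 0))
          (fun x hx => hw x (List.mem_cons_of_mem _ hx))
        refine ⟨fun k hk => ?_, fun hnd => h2.2 (PySem.Dict.nodup_keys_insert _ _ _ hnd)⟩
        rcases h2.1 k hk with hk' | hk'
        · rcases (PySem.Dict.mem_keys_insert _ _ _ _).mp hk' with rfl | hk''
          · exact Or.inr ⟨by omega, by omega⟩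
          · exact Or.inl hk''
        · exact Or.inr hk'

lemma pvBarMid_getD (vd : PySem.Dict Int Int) (h_ : Int) :
    ∀ (ps : List (Int × Int)) (acc : PySem.Dict Int Int) (s : Int),
      (ps.foldl (fun curr p =>
          barInner vd h_ p.1 p.2 curr (PySem.List.pyRange 2 (h_ - p.1 + 1) 1)) acc).getD s 0
        = acc.getD s 0 +
          (ps.map (fun p => if p.1 + 2 ≤ s ∧ s ≤ h_ then p.2 * vd.getD (s - p.1) 0 else 0)).sum := by
  intro ps
  induction ps with
  | nil => simp
  | cons p rest ih =>
    intro acc s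
    simp only [List.foldl_cons, List.map_cons, List.sum_cons]
    rw [ih _ s, pvBarInner_getD vd h_ p.1 p.2 ((h_ - p.1 + 1 - 2).toNat) 2 acc s rfl (by omega)]
    ring

lemma pvBarMid_keys (vd : PySem.Dict Int Int) (h_ : Int) :
    ∀ (ps : List (Int × Int)) (acc : PySem.Dict Int Int), (∀ p ∈ ps, 0 ≤ p.1) →
      (∀ k ∈ (ps.foldl (fun curr p =>
          barInner vd h_ p.1 p.2 curr (PySem.List.pyRange 2 (h_ - p.1 + 1) 1)) acc).keys,
          k ∈ acc.keys ∨ (0 ≤ k ∧ k ≤ h_)) ∧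
      (acc.keys.Nodup → (ps.foldl (fun curr p =>
          barInner vd h_ p.1 p.2 curr (PySem.List.pyRange 2 (h_ - p.1 + 1) 1)) acc).keys.Nodup) := by
  intro ps
  induction ps with
  | nil =>
    intro acc hp
    exact ⟨fun k hk => Or.inl hk, fun h => h⟩
  | cons p rest ih =>
    intro acc hp
    simp only [List.foldl_cons]
    have hin := pvBarInner_keys vd h_ p.1 p.2 (hp p (by simp))
      (PySem.List.pyRange 2 (h_ - p.1 + 1) 1) acc
      (fun w hw => by have := PySem.List.mem_pyRange_one.mp hw; omega)
    have h2 := ih (barInner vd h_ p.1 p.2 acc (PySem.List.pyRange 2 (h_ - p.1 + 1) 1))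
      (fun q hq => hp q (List.mem_cons_of_mem _ hq))
    refine ⟨fun k hk => ?_, fun hnd => h2.2 (hin.2 hnd)⟩
    rcases h2.1 k hk with hk' | hk'
    · exact hin.1 k hk'
    · exact Or.inr hk'

-- invariant carried through A's outer convolution loop
def pvDInv (h_ : Int) (H : Nat) (d : PySem.Dict Int Int) (phi : PowerSeries ℤ) : Prop :=
  d.keys.Nodup ∧ (∀ k ∈ d.keys, 0 ≤ k ∧ k ≤ h_) ∧
  ∀ t : Nat, t ≤ H → d.getD (t:Int) 0 = PowerSeries.coeff t phi

lemma pvStep (vd : PySem.Dict Int Int) (h_ : Int) (H : Nat) (hH : h_ = (H:Int))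
    (d : PySem.Dict Int Int) (phi : PowerSeries ℤ) (hinv : pvDInv h_ H d phi) :
    pvDInv h_ H
      (d.items.foldl (fun curr p =>
        barInner vd h_ p.1 p.2 curr (PySem.List.pyRange 2 (h_ - p.1 + 1) 1)) PySem.Dict.empty)
      (phi * pvP h_ (fun w => vd.getD w 0)) := by
  obtain ⟨hnd, hbd, hco⟩ := hinv
  have hp0 : ∀ p ∈ d.items, 0 ≤ p.1 := fun p hp =>
    (hbd p.1 (PySem.Dict.mem_keys_of_mem_items d hp)).1
  have hkeys := pvBarMid_keys vd h_ d.items PySem.Dict.empty hp0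
  refine ⟨hkeys.2 (by rw [PySem.Dict.keys_empty]; exact List.nodup_nil), fun k hk => ?_, ?_⟩
  · rcases hkeys.1 k hk with hk' | hk'
    · rw [PySem.Dict.keys_empty] at hk'
      exact absurd hk' (List.not_mem_nil)
    · exact hk'
  · intro s hs
    subst hH
    rw [pvBarMid_getD, PySem.Dict.getD_empty, zero_add]
    rw [PySem.Dict.items_eq_map_keys d hnd 0, List.map_map]
    have hemb : Function.Injective (fun j : Nat => (j : Int)) := by
      intro a b hab
      simp only [Int.natCast_inj] at hab
      exact hab
    rw [show ((fun p : Int × Int =>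
          if p.1 + 2 ≤ (s:Int) ∧ (s:Int) ≤ ((H:Nat):Int) then p.2 * vd.getD ((s:Int) - p.1) 0 else 0) ∘
          (fun k => (k, d.getD k 0)))
        = (fun k : Int =>
          if k + 2 ≤ (s:Int) ∧ (s:Int) ≤ ((H:Nat):Int) then d.getD k 0 * vd.getD ((s:Int) - k) 0 else 0)
      from rfl]
    rw [← List.sum_toFinset _ hnd]
    rw [Finset.sum_subset
      (show d.keys.toFinset ⊆ (Finset.range (H+1)).map ⟨fun j : Nat => (j : Int), hemb⟩ by
        intro k hk
        have hkm := List.mem_toFinset.mp hk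
        have hb := hbd k hkm
        rw [Finset.mem_map]
        exact ⟨k.toNat, Finset.mem_range.mpr (by omega),
          by simp only [Function.Embedding.coeFn_mk]; omega⟩)
      (by
        intro t _ htn
        have hct : d.contains t = false := by
          rcases hcb : d.contains t with _ | _
          · rfl
          · exact absurd (List.mem_toFinset.mpr
              ((PySem.Dict.contains_iff_mem_keys d t).mp hcb)) htn
        rw [PySem.Dict.getD_of_not_contains _ _ hct]
        split_ifs <;> simp)]
    rw [Finset.sum_map]
    simp only [Function.Embedding.coeFn_mk]
    rw [pvCoeff_mul_list, ← List.sum_toFinset _ List.nodup_range, List.toFinset_range,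
      Finset.sum_subset (show Finset.range (s+1) ⊆ Finset.range (H+1) by
          intro x hx
          simp only [Finset.mem_range] at *
          omega)
        (by
          intro j hj hjn
          have hjs : s < j := by
            simp only [Finset.mem_range] at hj hjn
            omega
          rw [Nat.sub_eq_zero_of_le (by omega)]
          have : PowerSeries.coeff 0 (pvP ((H:Nat):Int) (fun w => vd.getD w 0)) = 0 := by
            simp [pvP, PowerSeries.coeff_mk]
          rw [this, mul_zero])]
    apply Finset.sum_congr rfl
    intro j hj
    have hjH : j ≤ H := by
      have := Finset.mem_range.mp hj
      omega
    simp only [pvP, PowerSeries.coeff_mk]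
    by_cases hc : j + 2 ≤ s
    · rw [if_pos (by constructor <;> omega),
        if_pos (show 2 ≤ ((s - j : Nat) : Int) ∧ ((s - j : Nat) : Int) ≤ ((H:Nat):Int) by
          constructor <;> omega),
        hco j (by omega)]
      have hcast : ((s - j : Nat) : Int) = (s : Int) - (j : Int) := by omega
      rw [hcast]
    · rw [if_neg (by omega), if_neg (show ¬ (2 ≤ ((s - j : Nat) : Int) ∧
        ((s - j : Nat) : Int) ≤ ((H:Nat):Int)) by omega), mul_zero]

lemma pvLoopGen (vd : PySem.Dict Int Int) (h_ : Int) (H : Nat) (hH : h_ = (H:Int)) :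
    ∀ (l : List Int) (d : PySem.Dict Int Int) (phi : PowerSeries ℤ), pvDInv h_ H d phi →
      pvDInv h_ H
        (l.foldl (fun prev _ => prev.items.foldl (fun curr p =>
          barInner vd h_ p.1 p.2 curr (PySem.List.pyRange 2 (h_ - p.1 + 1) 1)) PySem.Dict.empty) d)
        (phi * (pvP h_ (fun w => vd.getD w 0)) ^ l.length) := by
  intro l
  induction l with
  | nil =>
    intro d phi hinv
    simpa using hinv
  | cons x rest ih =>
    intro d phi hinv
    simp only [List.foldl_cons, List.length_cons]
    have := ih _ _ (pvStep vd h_ H hH d phi hinv)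
    have heq : phi * pvP h_ (fun w => vd.getD w 0) * (pvP h_ (fun w => vd.getD w 0)) ^ rest.length
        = phi * (pvP h_ (fun w => vd.getD w 0)) ^ (rest.length + 1) := by
      rw [pow_succ]
      ring
    rwa [heq] at this


lemma pvInit (H : Nat) : pvDInv ((H:Nat):Int) H (PySem.Dict.mk [(0,1)]) 1 := by
  refine ⟨?_, ?_, ?_⟩
  · simp [PySem.Dict.keys]
  · intro k hk
    simp [PySem.Dict.keys] at hk
    subst hk
    exact ⟨le_refl 0, by omega⟩
  · intro t ht
    rw [PySem.Dict.getD_eq_get?_getD, PySem.Dict.get?_mk_cons, PowerSeries.coeff_one]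
    cases t with
    | zero => simp
    | succ k =>
      rw [if_neg (by simp; omega)]
      simp [PySem.Dict.get?]

lemma pvA_core (vd : PySem.Dict Int Int) (H : Nat) (n : Int) (hn : 0 ≤ n) :
    ((PySem.List.pyRange 0 (n+1) 1).foldl (fun prev _ => prev.items.foldl (fun curr p =>
        barInner vd ((H:Nat):Int) p.1 p.2 curr
          (PySem.List.pyRange 2 (((H:Nat):Int) - p.1 + 1) 1)) PySem.Dict.empty)
      (PySem.Dict.mk [(0,1)])).getD ((H:Nat):Int) 0
      = PowerSeries.coeff H ((pvP ((H:Nat):Int) (fun w => vd.getD w 0)) ^ (n+1).toNat) := by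
  have hinv := pvLoopGen vd ((H:Nat):Int) H rfl (PySem.List.pyRange 0 (n+1) 1) _ 1 (pvInit H)
  rw [PySem.List.length_pyRange_one, one_mul] at hinv
  have hlen : ((n + 1) - 0).toNat = (n+1).toNat := by omega
  rw [hlen] at hinv
  exact hinv.2.2 H (le_refl H)

lemma pvP_congr (h_ : Int) (f g : Int → Int)
    (h : ∀ w : Int, 2 ≤ w → w ≤ h_ → f w = g w) : pvP h_ f = pvP h_ g := by
  apply PowerSeries.ext
  intro k
  simp only [pvP, PowerSeries.coeff_mk]
  split_ifs with hc
  · exact h _ hc.1 hc.2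
  · rfl

lemma pvGetD_set (l : List Int) (i : Nat) (v : Int) (k : Nat) :
    (l.set i v).getD k 0 = if i = k ∧ k < l.length then v else l.getD k 0 := by
  simp [List.getD, List.getElem?_set]
  split_ifs <;> simp_all

noncomputable def pvGeom (m : Nat) : PowerSeries ℤ :=
  PowerSeries.mk (fun k => if m ∣ k then 1 else 0)

lemma pvGeom_eq (m : Nat) (hm : 1 ≤ m) :
    pvGeom m = 1 + PowerSeries.X ^ m * pvGeom m := by
  apply PowerSeries.ext
  intro k
  rw [map_add, PowerSeries.coeff_one, PowerSeries.coeff_X_pow_mul']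
  simp only [pvGeom, PowerSeries.coeff_mk]
  by_cases h0 : k = 0
  · subst h0
    rw [if_pos (dvd_zero m), if_pos rfl, if_neg (by omega)]
    norm_num
  · rw [if_neg h0]
    by_cases hmk : m ≤ k
    · rw [if_pos hmk, zero_add]
      by_cases hdk : m ∣ k
      · rw [if_pos hdk, if_pos (Nat.dvd_sub hdk (dvd_refl m))]
      · rw [if_neg hdk, if_neg (fun hc => hdk (by
          have h2 := Nat.dvd_add hc (dvd_refl m)
          rwa [Nat.sub_add_cancel hmk] at h2))]
    · rw [if_neg hmk, if_neg (fun hdk => by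
        rcases hdk with ⟨t, ht⟩
        rcases t with _ | t
        · omega
        · subst ht; exact hmk (by nlinarith)), add_zero]

lemma pvGeom_rec (M : Nat) (hm : 1 ≤ M) (phi : PowerSeries ℤ) (k : Nat) :
    PowerSeries.coeff k (phi * pvGeom M)
      = PowerSeries.coeff k phi +
        (if M ≤ k then PowerSeries.coeff (k - M) (phi * pvGeom M) else 0) := by
  conv_lhs => rw [pvGeom_eq M hm]
  rw [mul_add, mul_one, mul_left_comm phi (PowerSeries.X ^ M) (pvGeom M),
    map_add, PowerSeries.coeff_X_pow_mul']

lemma pvDivStep_go (max_h m : Int) (hm : 1 ≤ m) (phi : PowerSeries ℤ) :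
    ∀ (cnt : Nat) (lo : Int) (c : List Int), (max_h + 1 - lo).toNat = cnt → m ≤ lo →
      c.length = (max_h + 1).toNat →
      (∀ k : Nat, (k:Int) < lo → k < c.length →
        c.getD k 0 = PowerSeries.coeff k (phi * pvGeom m.toNat)) →
      (∀ k : Nat, lo ≤ (k:Int) → k < c.length →
        c.getD k 0 = PowerSeries.coeff k phi) →
      ((PySem.List.pyRange lo (max_h+1) 1).foldl (fun c k =>
          PySem.List.pySetD c k (PySem.List.pyGetD c k 0 + PySem.List.pyGetD c (k - m) 0)) c).length
          = c.length ∧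
      ∀ k : Nat, k < c.length →
        ((PySem.List.pyRange lo (max_h+1) 1).foldl (fun c k =>
          PySem.List.pySetD c k (PySem.List.pyGetD c k 0 + PySem.List.pyGetD c (k - m) 0)) c).getD k 0
          = PowerSeries.coeff k (phi * pvGeom m.toNat) := by
  intro cnt
  induction cnt with
  | zero =>
    intro lo c hcnt hlo hlen hdone htodo
    rw [PySem.List.pyRange_one_eq_nil (by omega)]
    exact ⟨rfl, fun k hk => hdone k (by omega) hk⟩
  | succ cnt ih =>
    intro lo c hcnt hlo hlen hdone htodo
    have hlt : lo < max_h + 1 := by omega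
    rw [PySem.List.pyRange_one_cons hlt]
    simp only [List.foldl_cons]
    set M := m.toNat with hMdef
    set L := lo.toNat with hLdef
    have hM : m = (M:Int) := by omega
    have hL : lo = (L:Int) := by omega
    have hLlen : L < c.length := by rw [hlen]; omega
    have hMLle : M ≤ L := by omega
    have hsub : lo - m = ((L - M : Nat) : Int) := by omega
    have hval : PySem.List.pyGetD c lo 0 + PySem.List.pyGetD c (lo - m) 0
        = PowerSeries.coeff L (phi * pvGeom M) := by
      rw [hsub, hL, PySem.List.pyGetD_natCast, PySem.List.pyGetD_natCast,
        htodo L (by omega) hLlen, hdone (L - M) (by omega) (by omega),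
        pvGeom_rec M (by omega) phi L, if_pos hMLle]
    have hlen' : (PySem.List.pySetD c lo
        (PySem.List.pyGetD c lo 0 + PySem.List.pyGetD c (lo - m) 0)).length = c.length :=
      PySem.List.length_pySetD c lo _
    have hget' : ∀ k : Nat, (PySem.List.pySetD c lo
        (PySem.List.pyGetD c lo 0 + PySem.List.pyGetD c (lo - m) 0)).getD k 0
        = if L = k ∧ k < c.length then PowerSeries.coeff L (phi * pvGeom M) else c.getD k 0 := by
      intro k
      rw [hval, hL, PySem.List.pySetD_of_nonneg c _ (by omega), Int.toNat_natCast, pvGetD_set]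
    have hrec := ih (lo + 1) _ (by omega) (by omega) (by rw [hlen']; exact hlen)
      (fun k hk hklen => by
        rw [hget' k]
        by_cases hkL : L = k
        · subst hkL
          rw [if_pos ⟨rfl, by omega⟩]
        · rw [if_neg (fun hc => hkL hc.1)]
          exact hdone k (by omega) (by rw [hlen'] at hklen; exact hklen))
      (fun k hk hklen => by
        rw [hget' k, if_neg (by intro hc; omega)]
        exact htodo k (by omega) (by rw [hlen'] at hklen; exact hklen))
    rw [hlen'] at hrec
    exact hrec

noncomputable def pvGProd (a max_h : Int) : PowerSeries ℤ :=
  ((PySem.List.pyRange a (max_h+1) 1).map (fun m => pvGeom m.toNat)).prod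

lemma pvFoldDiv (max_h : Int) : ∀ (cnt : Nat) (a : Int) (c : List Int) (phi : PowerSeries ℤ),
    (max_h + 1 - a).toNat = cnt → 1 ≤ a →
    c.length = (max_h+1).toNat →
    (∀ k : Nat, k < c.length → c.getD k 0 = PowerSeries.coeff k phi) →
    ((PySem.List.pyRange a (max_h+1) 1).foldl (fun c m => divStep max_h m c) c).length = c.length ∧
    ∀ k : Nat, k < c.length →
      ((PySem.List.pyRange a (max_h+1) 1).foldl (fun c m => divStep max_h m c) c).getD k 0
        = PowerSeries.coeff k (phi * pvGProd a max_h) := by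
  intro cnt
  induction cnt with
  | zero =>
    intro a c phi hcnt ha hlen hc
    rw [PySem.List.pyRange_one_eq_nil (by omega)]
    refine ⟨rfl, fun k hk => ?_⟩
    rw [pvGProd, PySem.List.pyRange_one_eq_nil (by omega)]
    simp only [List.map_nil, List.prod_nil, mul_one, List.foldl_nil]
    exact hc k hk
  | succ cnt ih =>
    intro a c phi hcnt ha hlen hc
    have hlt : a < max_h + 1 := by omega
    rw [PySem.List.pyRange_one_cons hlt]
    simp only [List.foldl_cons]
    have hstep := pvDivStep_go max_h a (by omega) phi ((max_h + 1 - a).toNat) a c rfl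
      (le_refl a) hlen
      (fun k hk hklen => by
        rw [hc k hklen, pvGeom_rec a.toNat (by omega) phi k, if_neg (by omega), add_zero])
      (fun k _ hklen => hc k hklen)
    have hstep' : (divStep max_h a c).length = c.length ∧
        (∀ k : Nat, k < c.length → (divStep max_h a c).getD k 0
          = PowerSeries.coeff k (phi * pvGeom a.toNat)) := hstep
    have hrec := ih (a+1) (divStep max_h a c) (phi * pvGeom a.toNat) (by omega) (by omega)
      (by rw [hstep'.1]; exact hlen)
      (fun k hk => hstep'.2 k (by rw [hstep'.1] at hk; exact hk))
    rw [hstep'.1] at hrec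
    refine ⟨hrec.1, fun k hk => ?_⟩
    rw [hrec.2 k hk]
    congr 1
    rw [mul_assoc]
    congr 1
    conv_rhs => rw [pvGProd, PySem.List.pyRange_one_cons hlt, List.map_cons, List.prod_cons]
    rfl

lemma pvBase_getD (L : Nat) (hL : 1 ≤ L) (k : Nat) (hk : k < L) :
    (PySem.List.pySetD (List.replicate L (0:Int)) 0 1).getD k 0 = PowerSeries.coeff k 1 := by
  rw [PySem.List.pySetD_of_nonneg _ _ (by omega), Int.toNat_zero, pvGetD_set,
    PowerSeries.coeff_one, List.length_replicate]
  by_cases hk0 : k = 0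
  · subst hk0
    rw [if_pos ⟨rfl, hL⟩, if_pos rfl]
  · rw [if_neg (fun hc => hk0 hc.1.symm), if_neg hk0]
    simp [List.getD, hk]

lemma pvConvInner (max_h i : Int) (cL cW : List Int) (hi : 0 ≤ i) :
    ∀ (cnt : Nat) (jlo : Int) (prod : List Int),
      (max_h + 1 - i - jlo).toNat = cnt → 0 ≤ jlo → prod.length = (max_h+1).toNat →
      ((PySem.List.pyRange jlo (max_h + 1 - i) 1).foldl (fun prod j =>
          PySem.List.pySetD prod (i + j)
            (PySem.List.pyGetD prod (i + j) 0 +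
              PySem.List.pyGetD cL i 0 * PySem.List.pyGetD cW j 0)) prod).length = prod.length ∧
      ∀ k : Nat, k < prod.length →
      ((PySem.List.pyRange jlo (max_h + 1 - i) 1).foldl (fun prod j =>
          PySem.List.pySetD prod (i + j)
            (PySem.List.pyGetD prod (i + j) 0 +
              PySem.List.pyGetD cL i 0 * PySem.List.pyGetD cW j 0)) prod).getD k 0
        = prod.getD k 0 + (if i + jlo ≤ (k:Int) ∧ (k:Int) ≤ max_h then
            PySem.List.pyGetD cL i 0 * PySem.List.pyGetD cW ((k:Int) - i) 0 else 0) := by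
  intro cnt
  induction cnt with
  | zero =>
    intro jlo prod hcnt hj hlen
    rw [PySem.List.pyRange_one_eq_nil (by omega)]
    refine ⟨rfl, fun k hk => ?_⟩
    rw [if_neg (by rw [hlen] at hk; omega), add_zero, List.foldl_nil]
  | succ cnt ih =>
    intro jlo prod hcnt hj hlen
    have hlt : jlo < max_h + 1 - i := by omega
    rw [PySem.List.pyRange_one_cons hlt]
    simp only [List.foldl_cons]
    have hP : (i + jlo).toNat < prod.length := by rw [hlen]; omega
    have hget' : ∀ k : Nat, (PySem.List.pySetD prod (i + jlo)
        (PySem.List.pyGetD prod (i + jlo) 0 +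
          PySem.List.pyGetD cL i 0 * PySem.List.pyGetD cW jlo 0)).getD k 0
        = if (i + jlo).toNat = k ∧ k < prod.length then
            prod.getD (i + jlo).toNat 0 + PySem.List.pyGetD cL i 0 * PySem.List.pyGetD cW jlo 0
          else prod.getD k 0 := by
      intro k
      rw [PySem.List.pySetD_of_nonneg _ _ (by omega), pvGetD_set,
        PySem.List.pyGetD_of_nonneg _ _ (by omega)]
    have hlen' : (PySem.List.pySetD prod (i + jlo)
        (PySem.List.pyGetD prod (i + jlo) 0 +
          PySem.List.pyGetD cL i 0 * PySem.List.pyGetD cW jlo 0)).length = prod.length :=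
      PySem.List.length_pySetD _ _ _
    have hrec := ih (jlo + 1) _ (by omega) (by omega) (by rw [hlen']; exact hlen)
    rw [hlen'] at hrec
    refine ⟨hrec.1, fun k hk => ?_⟩
    rw [hrec.2 k hk, hget' k]
    by_cases hkP : (k:Int) = i + jlo
    · have hkP' : (i + jlo).toNat = k := by omega
      rw [if_pos ⟨hkP', hk⟩, if_neg (by omega), if_pos (by omega), add_zero, hkP']
      have hjlo : (k:Int) - i = jlo := by omega
      rw [hjlo]
    · rw [if_neg (fun hc => hkP (by omega)),
        if_congr (show (i + (jlo+1) ≤ (k:Int) ∧ (k:Int) ≤ max_h)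
          ↔ (i + jlo ≤ (k:Int) ∧ (k:Int) ≤ max_h) by omega) rfl rfl]

lemma pvConvOuter (max_h : Int) (cL cW : List Int) :
    ∀ (cnt : Nat) (ilo : Int) (prod : List Int),
      (max_h + 1 - ilo).toNat = cnt → 0 ≤ ilo → prod.length = (max_h+1).toNat →
      ((PySem.List.pyRange ilo (max_h + 1) 1).foldl (fun prod i =>
          (PySem.List.pyRange 0 (max_h + 1 - i) 1).foldl (fun prod j =>
            PySem.List.pySetD prod (i + j)
              (PySem.List.pyGetD prod (i + j) 0 +
                PySem.List.pyGetD cL i 0 * PySem.List.pyGetD cW j 0)) prod) prod).length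
          = prod.length ∧
      ∀ k : Nat, k < prod.length →
      ((PySem.List.pyRange ilo (max_h + 1) 1).foldl (fun prod i =>
          (PySem.List.pyRange 0 (max_h + 1 - i) 1).foldl (fun prod j =>
            PySem.List.pySetD prod (i + j)
              (PySem.List.pyGetD prod (i + j) 0 +
                PySem.List.pyGetD cL i 0 * PySem.List.pyGetD cW j 0)) prod) prod).getD k 0
        = prod.getD k 0 + ((PySem.List.pyRange ilo (max_h + 1) 1).map (fun i =>
            if i ≤ (k:Int) ∧ (k:Int) ≤ max_h then
              PySem.List.pyGetD cL i 0 * PySem.List.pyGetD cW ((k:Int) - i) 0 else 0)).sum := by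
  intro cnt
  induction cnt with
  | zero =>
    intro ilo prod hcnt hi hlen
    rw [PySem.List.pyRange_one_eq_nil (by omega)]
    exact ⟨rfl, fun k hk => by simp⟩
  | succ cnt ih =>
    intro ilo prod hcnt hi hlen
    have hlt : ilo < max_h + 1 := by omega
    rw [PySem.List.pyRange_one_cons hlt]
    simp only [List.foldl_cons, List.map_cons, List.sum_cons]
    have hin := pvConvInner max_h ilo cL cW hi ((max_h + 1 - ilo - 0).toNat) 0 prod rfl
      (le_refl 0) hlen
    have hrec := ih (ilo + 1) _ (by omega) (by omega) (by rw [hin.1]; exact hlen)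
    rw [hin.1] at hrec
    refine ⟨hrec.1, fun k hk => ?_⟩
    rw [hrec.2 k hk, hin.2 k hk,
      if_congr (show (ilo + 0 ≤ (k:Int) ∧ (k:Int) ≤ max_h)
        ↔ (ilo ≤ (k:Int) ∧ (k:Int) ≤ max_h) by omega) rfl rfl]
    ring

lemma pvConvSum (max_h : Int) (hmax : 0 ≤ max_h) (cL cW : List Int)
    (GP2 GP3 : PowerSeries ℤ) (L : Nat) (hLd : (max_h+1).toNat = L)
    (hcL : cL.length = L) (hcW : cW.length = L)
    (hL2 : ∀ k : Nat, k < L → cL.getD k 0 = PowerSeries.coeff k GP2)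
    (hW3 : ∀ k : Nat, k < L → cW.getD k 0 = PowerSeries.coeff k GP3)
    (k : Nat) (hk : k < L) :
    ((PySem.List.pyRange 0 (max_h + 1) 1).map (fun i =>
        if i ≤ (k:Int) ∧ (k:Int) ≤ max_h then
          PySem.List.pyGetD cL i 0 * PySem.List.pyGetD cW ((k:Int) - i) 0 else 0)).sum
      = PowerSeries.coeff k (GP2 * GP3) := by
  rw [PySem.List.pyRange_zero (max_h + 1), hLd, List.map_map]
  rw [← List.sum_toFinset _ List.nodup_range, List.toFinset_range]
  rw [pvCoeff_mul_list, ← List.sum_toFinset _ List.nodup_range, List.toFinset_range]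
  rw [← Finset.sum_subset (show Finset.range (k+1) ⊆ Finset.range L by
      intro x hx
      simp only [Finset.mem_range] at *
      omega)
    (by
      intro j hj hjn
      simp only [Finset.mem_range] at hj hjn
      simp only [Function.comp_apply]
      rw [if_neg (by intro hc; omega)])]
  apply Finset.sum_congr rfl
  intro j hj
  have hjk : j ≤ k := by
    have := Finset.mem_range.mp hj
    omega
  simp only [Function.comp_apply]
  rw [if_pos ⟨by omega, by omega⟩, PySem.List.pyGetD_natCast,
    hL2 j (by omega)]
  have hcast : (k:Int) - (j:Int) = ((k - j : Nat) : Int) := by omega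
  rw [hcast, PySem.List.pyGetD_natCast, hW3 (k - j) (by omega)]

lemma pvDictGf_getD (max_h : Int) (prodL : List Int) (w : Int) :
    ((PySem.List.pyRange 0 (max_h + 1) 1).foldl
      (fun d h => d.insert h (PySem.List.pyGetD prodL h 0)) PySem.Dict.empty).getD w 0
      = if 0 ≤ w ∧ w < max_h + 1 then PySem.List.pyGetD prodL w 0 else 0 := by
  have hfresh := PySem.Dict.items_foldl_insert_fresh (PySem.List.pyRange 0 (max_h+1) 1)
    (fun a => a) (fun a => PySem.List.pyGetD prodL a 0) PySem.Dict.empty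
    (fun a _ => PySem.Dict.contains_empty a)
    (by rw [List.map_id']; exact PySem.List.nodup_pyRange_one _ _)
  have hkeys : ((PySem.List.pyRange 0 (max_h + 1) 1).foldl
      (fun d h => d.insert h (PySem.List.pyGetD prodL h 0)) PySem.Dict.empty).keys
      = PySem.List.pyRange 0 (max_h + 1) 1 := by
    simp only [PySem.Dict.keys, hfresh, List.map_append, List.map_map]
    rw [show PySem.Dict.empty.items = ([] : List (Int × Int)) from rfl]
    simp [Function.comp_def]
  have hnd : ((PySem.List.pyRange 0 (max_h + 1) 1).foldl
      (fun d h => d.insert h (PySem.List.pyGetD prodL h 0)) PySem.Dict.empty).keys.Nodup := by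
    rw [hkeys]
    exact PySem.List.nodup_pyRange_one _ _
  by_cases hw : 0 ≤ w ∧ w < max_h + 1
  · rw [if_pos hw]
    apply PySem.Dict.getD_of_mem_items _ _ hnd
    rw [hfresh]
    apply List.mem_append_right
    exact List.mem_map.mpr ⟨w, PySem.List.mem_pyRange_one.mpr ⟨hw.1, hw.2⟩, rfl⟩
  · rw [if_neg hw]
    apply PySem.Dict.getD_of_not_contains
    rcases hcb : PySem.Dict.contains _ w with _ | _
    · rfl
    · exfalso
      have := (PySem.Dict.contains_iff_mem_keys _ w).mp hcb
      rw [hkeys] at this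
      exact hw ⟨(PySem.List.mem_pyRange_one.mp this).1, (PySem.List.mem_pyRange_one.mp this).2⟩

lemma pvSetD_self (l : List Int) (t : Int) (ht : 0 ≤ t) :
    PySem.List.pySetD l t (PySem.List.pyGetD l t 0) = l := by
  rw [PySem.List.pySetD_of_nonneg _ _ ht, PySem.List.pyGetD_of_nonneg _ _ ht]
  apply List.ext_getElem?
  intro j
  rw [List.getElem?_set]
  split_ifs with h1 h2
  · subst h1
    rw [List.getD_eq_getElem?_getD, List.getElem?_eq_getElem h2]
    rfl
  · subst h1
    rw [List.getElem?_eq_none (by omega)]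
  · rfl

lemma pvConvInnerZero (i : Int) (b : List Int) (hi : 0 ≤ i) :
    ∀ (ws : List Int) (r : List Int), (∀ w ∈ ws, 0 ≤ w) →
      ws.foldl (fun r j =>
        PySem.List.pySetD r (i + j)
          (PySem.List.pyGetD r (i + j) 0 + 0 * PySem.List.pyGetD b j 0)) r = r := by
  intro ws
  induction ws with
  | nil => intro r _; rfl
  | cons w rest ih =>
    intro r hw
    simp only [List.foldl_cons]
    rw [zero_mul, add_zero, pvSetD_self _ _ (by have := hw w (by simp); omega)]
    exact ih r (fun x hx => hw x (List.mem_cons_of_mem _ hx))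

lemma pvApprox_tmul (H : Nat) (a b : List Int) (phi psi : PowerSeries ℤ)
    (ha : pvApprox H a phi) (hb : pvApprox H b psi) :
    pvApprox H (tmul (H:Int) a b) (phi * psi) := by
  obtain ⟨haLen, haGet⟩ := ha
  obtain ⟨hbLen, hbGet⟩ := hb
  unfold tmul
  rw [PySem.List.enumerate_eq_map_pyRange a 0, List.foldl_map, PySem.List.len_eq, haLen]
  have hcast : ((H + 1 : Nat) : Int) = (H:Int) + 1 := by push_cast; ring
  rw [hcast]
  have hrepLen : (List.replicate ((H:Int) + 1).toNat (0:Int)).length = ((H:Int)+1).toNat := by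
    rw [List.length_replicate]
  rw [PySem.List.foldl_congr_mem _ _ (fun r i =>
      (PySem.List.pyRange 0 ((H:Int) + 1 - i) 1).foldl (fun r j =>
        PySem.List.pySetD r (i + j)
          (PySem.List.pyGetD r (i + j) 0 +
            PySem.List.pyGetD a i 0 * PySem.List.pyGetD b j 0)) r) _
    (by
      intro r i hi
      have hi0 : 0 ≤ i := (PySem.List.mem_pyRange_one.mp hi).1
      by_cases hz : PySem.List.pyGetD a i 0 = 0
      · rw [if_neg (by simpa using hz)]
        show r = (PySem.List.pyRange 0 ((H:Int) + 1 - i) 1).foldl (fun r j =>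
            PySem.List.pySetD r (i + j)
              (PySem.List.pyGetD r (i + j) 0 +
                PySem.List.pyGetD a i 0 * PySem.List.pyGetD b j 0)) r
        rw [hz, pvConvInnerZero i b hi0 _ r
          (fun w hw => (PySem.List.mem_pyRange_one.mp hw).1)]
      · rw [if_pos (by simpa using hz)])]
  obtain ⟨hOlen, hOget⟩ := pvConvOuter (H:Int) a b (((H:Int) + 1 - 0).toNat) 0
    (List.replicate ((H:Int) + 1).toNat (0:Int)) rfl (le_refl 0) hrepLen
  have hrep0 : ∀ k : Nat, (List.replicate ((H:Int)+1).toNat (0:Int)).getD k 0 = 0 := by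
    intro k
    simp only [List.getD, List.getElem?_replicate]
    split_ifs <;> rfl
  have hLen1 : (List.replicate ((H:Int) + 1).toNat (0:Int)).length = H + 1 := by
    rw [List.length_replicate]; omega
  refine ⟨by rw [hOlen, hLen1], fun k hk => ?_⟩
  rw [hOget k (by omega), hrep0 k, zero_add]
  exact pvConvSum (H:Int) (by omega) a b phi psi (H+1) (by omega) (by omega) (by omega)
    (fun t ht => haGet t (by omega)) (fun t ht => hbGet t (by omega)) k (by omega)

lemma pvApprox_powLoop (H : Nat) (m : Nat) : ∀ (e : Int), e.toNat = m → 0 ≤ e →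
    ∀ (res base : List Int) (R Bs : PowerSeries ℤ),
    pvApprox H res R → pvApprox H base Bs →
    pvApprox H (powLoop (H:Int) res base e) (R * Bs ^ m) := by
  induction m using Nat.strong_induction_on with
  | _ m ih =>
    intro e hm he res base R Bs hres hbase
    by_cases hpos : 0 < e
    · have hband : PySem.Int.band e 1 = e % 2 := by
        rw [PySem.Int.band_one, PySem.Int.mod_eq_emod_of_pos (by omega)]
      have hshift : e >>> (1:Nat) = e / 2 := by
        simpa using Int.shiftRight_eq_div_pow e 1
      have hmpos : 0 < m := by omega
      have htn : (e / 2).toNat = m / 2 := by omega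
      have hrec := ih (m / 2) (by omega) (e / 2) htn (by omega)
      rw [powLoop, dif_pos hpos]
      simp only [hband, hshift]
      by_cases hobit : e % 2 = 0
      · have hne : ¬ (e / 2 = 0) := by omega
        rw [if_neg (by omega : ¬ (e % 2 ≠ 0)), if_pos (by omega : e / 2 ≠ 0)]
        have hstep := hrec res (tmul (H:Int) base base) R (Bs * Bs) hres
          (pvApprox_tmul H base base Bs Bs hbase hbase)
        have hpow : R * (Bs * Bs) ^ (m / 2) = R * Bs ^ m := by
          have hmeven : m % 2 = 0 := by omega
          have h2m : 2 * (m / 2) = m := by omega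
          rw [← pow_two, ← pow_mul, h2m]
        rw [hpow] at hstep
        exact hstep
      · rw [if_pos (by omega : e % 2 ≠ 0)]
        by_cases hne : e / 2 = 0
        · have hm1 : m = 1 := by omega
          rw [if_neg (by omega : ¬ (e / 2 ≠ 0))]
          have hstep := hrec (tmul (H:Int) res base) base (R * Bs) Bs
            (pvApprox_tmul H res base R Bs hres hbase) hbase
          have hpow : R * Bs * Bs ^ (m / 2) = R * Bs ^ m := by
            rw [hm1]
            norm_num
          rw [hpow] at hstep
          exact hstep
        · rw [if_pos (by omega : e / 2 ≠ 0)]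
          have hstep := hrec (tmul (H:Int) res base) (tmul (H:Int) base base) (R * Bs) (Bs * Bs)
            (pvApprox_tmul H res base R Bs hres hbase)
            (pvApprox_tmul H base base Bs Bs hbase hbase)
          have hpow : R * Bs * (Bs * Bs) ^ (m / 2) = R * Bs ^ m := by
            have hmodd : m % 2 = 1 := by omega
            have h2m : 2 * (m / 2) + 1 = m := by omega
            rw [← pow_two, ← pow_mul, mul_assoc, ← pow_succ', h2m]
          rw [hpow] at hstep
          exact hstep
    · rw [powLoop, dif_neg hpos]
      have : m = 0 := by omega
      subst this
      simpa using hres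


lemma pvAlt_eq_coeff (n h_ : Int) (vd : Option (List (Int × Int))) (max_h : Int)
    (hg : ¬ h_ < 2 * (n + 1)) (hn : 0 ≤ n) :
    bar_chain_dim_alt n h_ vd max_h =
      PowerSeries.coeff h_.toNat ((pvP h_ (pvLookup vd max_h)) ^ (n.toNat + 1)) * pyFactorial n := by
  obtain ⟨H, hH⟩ : ∃ H : Nat, h_ = (H:Int) := ⟨h_.toNat, by omega⟩
  subst hH
  simp only [bar_chain_dim_alt]
  rw [if_neg hg]
  have hf : pvApprox H
      (match vd with
        | none =>
          let table := vbar_table max_h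
          (PySem.List.pyRange 0 ((H:Int) + 1) 1).map (fun w =>
            if 2 ≤ w ∧ w ≤ max_h then PySem.List.pyGetD table w 0 else 0)
        | some d =>
          (PySem.List.pyRange 0 ((H:Int) + 1) 1).map (fun w =>
            if 2 ≤ w then (PySem.Dict.mk d).getD w 0 else 0))
      (pvP (H:Int) (pvLookup vd max_h)) := by
    refine ⟨?_, ?_⟩
    · cases vd <;>
        simp only [List.length_map, PySem.List.length_pyRange_one] <;> omega
    cases vd with
    | none =>
      intro k hk
      rw [pvGetD_map_range_int _ H k hk]
      simp only [pvP, pvLookup, PowerSeries.coeff_mk, PySem.List.pyGetD_natCast,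
        Int.toNat_natCast]
      split_ifs <;> first | rfl | (exfalso; omega)
    | some d =>
      intro k hk
      rw [pvGetD_map_range_int _ H k hk]
      simp only [pvP, pvLookup, PowerSeries.coeff_mk]
      split_ifs <;> first | rfl | (exfalso; omega)
  have hres : pvApprox H (1 :: List.replicate H (0:Int)) 1 := by
    refine ⟨by simp, fun k hk => ?_⟩
    rw [pvGetD_one_replicate, PowerSeries.coeff_one]
  have hm : (n + 1).toNat = n.toNat + 1 := by omega
  have hfin := (pvApprox_powLoop H (n.toNat + 1) (n + 1) hm (by omega) _ _ 1
    (pvP (H:Int) (pvLookup vd max_h)) hres hf).2 H (le_refl H)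
  rw [one_mul] at hfin
  rw [Int.toNat_natCast, PySem.List.pyGetD_natCast, hfin]


-- A's dict table and B's list table agree on every relevant weight
lemma pvTable_agree (max_h : Int) (hmax : 0 ≤ max_h) (w : Int) (h2 : 2 ≤ w) :
    (dim_vbar_gf max_h).getD w 0
      = (if w ≤ max_h then (vbar_table max_h).getD w.toNat 0 else 0) := by
  simp only [dim_vbar_gf, vbar_table]
  set L := (max_h+1).toNat with hLdef
  have hL1 : 1 ≤ L := by omega
  set base := PySem.List.pySetD (List.replicate L (0:Int)) 0 1 with hbase
  have hbaseLen : base.length = L := by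
    rw [hbase, PySem.List.length_pySetD, List.length_replicate]
  have hbaseGet : ∀ k : Nat, k < base.length → base.getD k 0 = PowerSeries.coeff k 1 := by
    intro k hk
    rw [hbaseLen] at hk
    exact pvBase_getD L hL1 k hk
  obtain ⟨hcLlen, hcLget⟩ := pvFoldDiv max_h ((max_h + 1 - 2).toNat) 2 base 1 rfl (by omega)
    (by rw [hbaseLen, hLdef]) hbaseGet
  obtain ⟨hcWlen, hcWget⟩ := pvFoldDiv max_h ((max_h + 1 - 3).toNat) 3 base 1 rfl (by omega)
    (by rw [hbaseLen, hLdef]) hbaseGet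
  set cL := (PySem.List.pyRange 2 (max_h+1) 1).foldl (fun c m => divStep max_h m c) base with hcLdef
  set cW := (PySem.List.pyRange 3 (max_h+1) 1).foldl (fun c m => divStep max_h m c) base with hcWdef
  obtain ⟨hPlen, hPget⟩ := pvConvOuter max_h cL cW ((max_h + 1 - 0).toNat) 0
    (List.replicate L (0:Int)) rfl (le_refl 0) (by rw [List.length_replicate, hLdef])
  set prodA := (PySem.List.pyRange 0 (max_h + 1) 1).foldl (fun prod i =>
      (PySem.List.pyRange 0 (max_h + 1 - i) 1).foldl (fun prod j =>
        PySem.List.pySetD prod (i + j)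
          (PySem.List.pyGetD prod (i + j) 0 +
            PySem.List.pyGetD cL i 0 * PySem.List.pyGetD cW j 0)) prod)
      (List.replicate L (0:Int)) with hprodA
  have hrep0 : ∀ k : Nat, (List.replicate L (0:Int)).getD k 0 = 0 := by
    intro k
    simp only [List.getD, List.getElem?_replicate]
    split_ifs <;> rfl
  have hAget : ∀ k : Nat, k < L → prodA.getD k 0
      = PowerSeries.coeff k ((1 * pvGProd 2 max_h) * (1 * pvGProd 3 max_h)) := by
    intro k hk
    rw [hprodA, hPget k (by rw [List.length_replicate]; exact hk), hrep0 k, zero_add]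
    exact pvConvSum max_h hmax cL cW (1 * pvGProd 2 max_h) (1 * pvGProd 3 max_h) L hLdef.symm
      (by rw [hcLdef, hcLlen, hbaseLen]) (by rw [hcWdef, hcWlen, hbaseLen])
      (fun t ht => hcLget t (by rw [hbaseLen]; exact ht))
      (fun t ht => hcWget t (by rw [hbaseLen]; exact ht)) k hk
  -- the final p[0] -= 1 does not touch weights ≥ 1
  have hskip : ∀ (l : List Int) (v : Int) (k : Nat), 1 ≤ k →
      (PySem.List.pySetD l 0 v).getD k 0 = l.getD k 0 := by
    intro l v k hk
    rw [PySem.List.pySetD_of_nonneg _ _ (le_refl 0), Int.toNat_zero, pvGetD_set,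
      if_neg (fun hc => by omega)]
  -- B's table chain
  obtain ⟨hp3len, hp3get⟩ := pvFoldDiv max_h ((max_h + 1 - 3).toNat) 3 cL (1 * pvGProd 2 max_h)
    rfl (by omega) (by rw [hcLdef, hcLlen, hbaseLen, hLdef])
    (fun t ht => hcLget t (by rw [hcLdef, hcLlen] at ht; exact ht))
  set p3 := (PySem.List.pyRange 3 (max_h+1) 1).foldl (fun c m => divStep max_h m c) cL with hp3def
  rw [pvDictGf_getD]
  by_cases hw : w ≤ max_h
  · rw [if_pos (by omega : 0 ≤ w ∧ w < max_h + 1), if_pos hw]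
    set W := w.toNat with hWdef
    have hWL : W < L := by omega
    have hW1 : 1 ≤ W := by omega
    have hwW : w = (W:Int) := by omega
    rw [hwW, PySem.List.pyGetD_natCast, hskip _ _ W hW1, hskip _ _ W hW1,
      hAget W hWL, hp3get W (by rw [hcLdef, hcLlen, hbaseLen]; exact hWL)]
    congr 1
    ring
  · rw [if_neg (by omega), if_neg hw]
-- ===== VERDICT (by name: the statement is the Claim_ definition above) =====
theorem bar_chain_dim_spec : Claim_equal_bar_chain_dim := by
  intro n h_ vd max_h hdom hpre
  unfold Spec_bar_chain_dim
  by_cases hg : h_ < 2 * (n + 1)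
  · simp only [bar_chain_dim, bar_chain_dim_alt]
    rw [if_pos hg, if_pos hg]
  · have hn : 0 ≤ n := by
      by_contra hn
      exact absurd (hpre.2 (by omega)) hg
    rw [pvAlt_eq_coeff n h_ vd max_h hg hn]
    obtain ⟨H, hH⟩ : ∃ H : Nat, h_ = (H:Int) := ⟨h_.toNat, by omega⟩
    subst hH
    simp only [bar_chain_dim]
    rw [if_neg hg]
    have hm : (n+1).toNat = n.toNat + 1 := by omega
    cases vd with
    | some d =>
      rw [pvA_core (PySem.Dict.mk d) H n hn, Int.toNat_natCast, hm]
      rfl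
    | none =>
      rw [pvA_core (dim_vbar_gf max_h) H n hn, Int.toNat_natCast, hm]
      have hmax : 0 ≤ max_h := hpre.1 rfl
      rw [show pvP ((H:Nat):Int) (fun w => (dim_vbar_gf max_h).getD w 0)
            = pvP ((H:Nat):Int) (pvLookup none max_h) from
          pvP_congr _ _ _ (fun w h2 _ => pvTable_agree max_h hmax w h2)]
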